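-- pv_equiv track=rewrite | github.com/nikkss94/Python-Programming-0 | week 4/9-Winter-Is-Coming/winter.py | winter_is_coming
-- ===== SOURCE A (Python) =====
-- def winter_is_coming(seasons):
--     count = 0
--     for season in seasons:
--         if season == "winter":
--             count = 0
--         else:
--             count += 1
--     if count >= 5:
--         return True
--     else:
--         return False
-- ===== SOURCE B (Python) =====
-- def winter_is_coming(seasons):
--     try:
--         idx = seasons[::-1].index("winter")
--     except ValueError:
--         idx = len(seasons)
--     return idx >= 5
-- ===== Notes on version B (the rewrite author's own statement) =====
-- stated objective: simpler
-- what changed: Replaces the forward reset-and-count loop with locating the last 'winter' via a reversed .index search and comparing the trailing tail length arithmetically.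
import Mathlib
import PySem

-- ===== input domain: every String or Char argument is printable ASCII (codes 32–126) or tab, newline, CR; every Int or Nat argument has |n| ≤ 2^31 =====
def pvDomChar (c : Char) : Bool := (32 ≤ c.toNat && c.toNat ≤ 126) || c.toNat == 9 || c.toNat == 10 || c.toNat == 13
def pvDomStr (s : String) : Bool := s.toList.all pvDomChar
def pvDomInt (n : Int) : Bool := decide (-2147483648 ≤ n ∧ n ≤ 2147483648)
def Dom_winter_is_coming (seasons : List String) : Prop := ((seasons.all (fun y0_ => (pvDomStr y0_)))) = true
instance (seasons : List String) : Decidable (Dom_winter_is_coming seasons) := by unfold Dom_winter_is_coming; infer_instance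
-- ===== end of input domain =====

-- ===== PORT A =====
-- B searches for the last 'winter' (reversed .index) and compares tail length; same O(n), simpler.
def winter_is_coming (seasons : List String) : Bool :=
  let count : Int := seasons.foldl (fun c season => if season = "winter" then 0 else c + 1) 0
  if count ≥ 5 then true else false

-- ===== PORT B =====
-- seasons[::-1].index("winter") with ValueError fallback to len(seasons); return idx >= 5
def winter_is_coming_alt (seasons : List String) : Bool :=
  let idx : Nat := (PySem.List.index? seasons.reverse "winter").getD seasons.length
  decide (idx ≥ 5)

-- ===== PRECONDITION & SPEC =====
def Spec_winter_is_coming (seasons : List String) (out : Bool) : Prop := out = winter_is_coming_alt seasons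
instance (seasons : List String) (out : Bool) : Decidable (Spec_winter_is_coming seasons out) := by unfold Spec_winter_is_coming; infer_instance

-- ===== CLAIM (what is proved, stated in full; the proofs are below) =====
def Claim_equal_winter_is_coming : Prop := ∀ (seasons : List String), Dom_winter_is_coming seasons → Spec_winter_is_coming seasons (winter_is_coming seasons)

-- ===== LEMMAS AND PROOFS =====
theorem winter_count_eq (l : List String) (c : Int) :
    l.foldl (fun c season => if season = "winter" then 0 else c + 1) c
      = match PySem.List.index? l.reverse "winter" with
        | some i => (i : Int)
        | none => c + l.length := by
  induction l using List.reverseRecOn generalizing c with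
  | nil => simp [PySem.List.index?_eq_idxOf?]
  | append_singleton l a ih =>
      rw [List.foldl_append]
      rw [List.reverse_append]
      simp only [List.reverse_singleton, List.singleton_append]
      by_cases ha : a = "winter"
      · subst ha
        rw [PySem.List.index?_cons_self]
        simp [List.foldl]
      · rw [PySem.List.index?_cons_of_ne l.reverse ha]
        rw [List.foldl_cons, List.foldl_nil, if_neg ha, ih]
        cases h : PySem.List.index? l.reverse "winter" with
        | some i => simp
        | none => simp; ring

-- ===== VERDICT (by name: the statement is the Claim_ definition above) =====
theorem winter_is_coming_spec : Claim_equal_winter_is_coming := by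
  intro seasons _
  unfold Spec_winter_is_coming winter_is_coming winter_is_coming_alt
  rw [winter_count_eq]
  cases h : PySem.List.index? seasons.reverse "winter" with
  | some i => simp
  | none => simp
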